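-- pv_equiv track=rewrite | github.com/devans10/career-compass-bot | src/bot/parsing.py | build_goal_competency_mappings
-- ===== SOURCE A (Python) =====
-- from typing import Dict, List
--
-- def build_goal_competency_mappings(
--     entry_timestamp: str, entry_date: str, goal_ids: List[str], competency_ids: List[str]
-- ) -> List[Dict[str, str]]:
--     """Return GoalMappings rows for the provided identifiers."""
--
--     mappings: List[Dict[str, str]] = []
--
--     if goal_ids:
--         for goal_id in goal_ids:
--             if competency_ids:
--                 for competency_id in competency_ids:
--                     mappings.append(
--                         {
--                             "entrytimestamp": entry_timestamp,
--                             "entrydate": entry_date,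
--                             "goalid": goal_id,
--                             "competencyid": competency_id,
--                             "notes": "",
--                         }
--                     )
--             else:
--                 mappings.append(
--                     {
--                         "entrytimestamp": entry_timestamp,
--                         "entrydate": entry_date,
--                         "goalid": goal_id,
--                         "competencyid": "",
--                         "notes": "",
--                     }
--                 )
--     elif competency_ids:
--         for competency_id in competency_ids:
--             mappings.append(
--                 {
--                     "entrytimestamp": entry_timestamp,
--                     "entrydate": entry_date,
--                     "goalid": "",
--                     "competencyid": competency_id,
--                     "notes": "",
--                 }
--             )
--
--     return mappings
-- ===== SOURCE B (Python) =====
-- def build_goal_competency_mappings(entry_timestamp, entry_date, goal_ids, competency_ids):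
--     """Return GoalMappings rows for the provided identifiers."""
--     if not goal_ids and not competency_ids:
--         return []
--     gs = goal_ids if goal_ids else [""]
--     cs = competency_ids if competency_ids else [""]
--     # single flat loop: row i is (goal gs[i // len(cs)], competency cs[i % len(cs)])
--     total = len(gs) * len(cs)
--     rows = []
--     for i in range(total):
--         q, r = divmod(i, len(cs))
--         rows.append(
--             {
--                 "entrytimestamp": entry_timestamp,
--                 "entrydate": entry_date,
--                 "goalid": gs[q],
--                 "competencyid": cs[r],
--                 "notes": "",
--             }
--         )
--     return rows
-- ===== Notes on version B (the rewrite author's own statement) =====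
-- stated objective: alternative
-- what changed: Replaces A's three special-cased branches with nested loops by a single flat loop over range(len(gs)*len(cs)) that recovers each row's goal and competency by divmod index arithmetic on normalized lists.
import Mathlib
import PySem

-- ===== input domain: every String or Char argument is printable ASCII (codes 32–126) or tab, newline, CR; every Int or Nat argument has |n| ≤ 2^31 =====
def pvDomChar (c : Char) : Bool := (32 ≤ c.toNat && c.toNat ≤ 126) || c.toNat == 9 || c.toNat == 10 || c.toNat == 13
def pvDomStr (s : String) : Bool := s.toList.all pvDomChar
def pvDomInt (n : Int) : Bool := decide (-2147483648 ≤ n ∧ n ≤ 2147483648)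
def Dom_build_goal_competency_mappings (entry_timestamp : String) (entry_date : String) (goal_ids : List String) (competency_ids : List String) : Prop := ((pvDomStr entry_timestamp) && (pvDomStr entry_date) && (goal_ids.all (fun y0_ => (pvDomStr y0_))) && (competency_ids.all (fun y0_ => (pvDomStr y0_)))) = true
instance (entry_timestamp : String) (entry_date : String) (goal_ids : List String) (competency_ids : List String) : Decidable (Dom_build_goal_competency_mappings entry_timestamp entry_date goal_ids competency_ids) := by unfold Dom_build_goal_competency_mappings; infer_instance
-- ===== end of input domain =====

-- B replaces A's three special-cased branches with nested loops by one flat loop over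
-- range(len(gs)*len(cs)) using divmod index arithmetic (objective: alternative).

-- ===== PORT A =====
-- literal transliteration: outer if goal_ids / elif competency_ids, nested loops appending rows
def build_goal_competency_mappings (entry_timestamp : String) (entry_date : String) (goal_ids : List String) (competency_ids : List String) : List (List (String × String)) :=
  if !goal_ids.isEmpty then
    goal_ids.foldl (fun mappings goal_id =>
      if !competency_ids.isEmpty then
        competency_ids.foldl (fun mappings competency_id =>
          mappings ++ [[("entrytimestamp", entry_timestamp), ("entrydate", entry_date),
                        ("goalid", goal_id), ("competencyid", competency_id), ("notes", "")]]) mappings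
      else
        mappings ++ [[("entrytimestamp", entry_timestamp), ("entrydate", entry_date),
                      ("goalid", goal_id), ("competencyid", ""), ("notes", "")]]) []
  else if !competency_ids.isEmpty then
    competency_ids.foldl (fun mappings competency_id =>
      mappings ++ [[("entrytimestamp", entry_timestamp), ("entrydate", entry_date),
                    ("goalid", ""), ("competencyid", competency_id), ("notes", "")]]) []
  else []

-- ===== PORT B =====
-- literal transliteration of Source B: early [] guard, normalize, then one flat loop over
-- range(total) with divmod(i, len(cs)).  Python's divmod on these nonnegative ints is
-- exactly Nat division/modulo, and gs[q]/cs[r] are always in range (q < len gs,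
-- r < len cs), so List.getD is exact here.
def build_goal_competency_mappings_alt (entry_timestamp : String) (entry_date : String) (goal_ids : List String) (competency_ids : List String) : List (List (String × String)) :=
  if goal_ids.isEmpty && competency_ids.isEmpty then []
  else
    let gs := if !goal_ids.isEmpty then goal_ids else [""]
    let cs := if !competency_ids.isEmpty then competency_ids else [""]
    let total := gs.length * cs.length
    (List.range total).foldl (fun rows i =>
      let q := i / cs.length
      let r := i % cs.length
      rows ++ [[("entrytimestamp", entry_timestamp), ("entrydate", entry_date),
                ("goalid", gs.getD q ""), ("competencyid", cs.getD r ""), ("notes", "")]]) []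

-- ===== PRECONDITION & SPEC =====
def Spec_build_goal_competency_mappings (entry_timestamp : String) (entry_date : String) (goal_ids : List String) (competency_ids : List String) (out : List (List (String × String))) : Prop := out = build_goal_competency_mappings_alt entry_timestamp entry_date goal_ids competency_ids
instance (entry_timestamp : String) (entry_date : String) (goal_ids : List String) (competency_ids : List String) (out : List (List (String × String))) : Decidable (Spec_build_goal_competency_mappings entry_timestamp entry_date goal_ids competency_ids out) := by unfold Spec_build_goal_competency_mappings; infer_instance

-- ===== CLAIM (what is proved, stated in full; the proofs are below) =====
def Claim_equal_build_goal_competency_mappings : Prop := ∀ (entry_timestamp : String) (entry_date : String) (goal_ids : List String) (competency_ids : List String), Dom_build_goal_competency_mappings entry_timestamp entry_date goal_ids competency_ids → Spec_build_goal_competency_mappings entry_timestamp entry_date goal_ids competency_ids (build_goal_competency_mappings entry_timestamp entry_date goal_ids competency_ids)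

-- ===== LEMMAS AND PROOFS =====

-- enumerating a list by index: map getD over range (length) gives back the list
lemma pv_map_getD_range {α : Type} (l : List α) (d : α) :
    (List.range l.length).map (fun i => l.getD i d) = l := by
  induction l with
  | nil => rfl
  | cons x xs ih =>
    simp only [List.length_cons, List.range_succ_eq_map, List.map_cons, List.map_map]
    simpa using ih

-- the flat index loop equals the nested cross product when cs is nonempty
lemma pv_range_mul {α β γ : Type} (gs : List α) (cs : List β) (hc : cs ≠ [])
    (row : α → β → γ) (da : α) (db : β) :
    (List.range (gs.length * cs.length)).map
        (fun i => row (gs.getD (i / cs.length) da) (cs.getD (i % cs.length) db))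
      = gs.flatMap (fun g => cs.map (row g)) := by
  have hk : 0 < cs.length := List.length_pos_iff.mpr hc
  induction gs with
  | nil => simp
  | cons g t ih =>
    have hlen : (g :: t).length * cs.length = cs.length + t.length * cs.length := by
      simp [List.length_cons, Nat.succ_mul, Nat.add_comm]
    rw [hlen, List.range_add, List.map_append, List.flatMap_cons]
    congr 1
    · -- first block: indices i < cs.length pick g and cs[i]
      calc (List.range cs.length).map
              (fun i => row ((g :: t).getD (i / cs.length) da) (cs.getD (i % cs.length) db))
          = (List.range cs.length).map (fun i => row g (cs.getD i db)) := by
            apply List.map_congr_left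
            intro i hi
            rw [List.mem_range] at hi
            simp [Nat.div_eq_of_lt hi, Nat.mod_eq_of_lt hi]
        _ = ((List.range cs.length).map (fun i => cs.getD i db)).map (row g) := by
            rw [List.map_map]; rfl
        _ = cs.map (row g) := by rw [pv_map_getD_range]
    · -- remaining blocks: shift by cs.length and use the IH on t
      rw [List.map_map, ← ih]
      apply List.map_congr_left
      intro i _
      have hdiv : (cs.length + i) / cs.length = i / cs.length + 1 := by
        rw [Nat.add_comm]; exact Nat.add_div_right i hk
      simp [Function.comp, hdiv, Nat.add_mod_left]

-- flatMap of singleton rows is a map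
lemma pv_flatMap_singleton {α β : Type} (l : List α) (f : α → β) :
    l.flatMap (fun x => [f x]) = l.map f := by
  induction l with
  | nil => rfl
  | cons x xs ih => simp [ih]

-- append-loops as map / flatMap
lemma pv_foldl_append {α γ : Type} (l : List α) (f : α → γ) (acc : List γ) :
    l.foldl (fun m x => m ++ [f x]) acc = acc ++ l.map f :=
  PySem.List.foldl_append_singleton_eq_map ..

lemma pv_nested_foldl {α β γ : Type} (gs : List α) (cs : List β) (row : α → β → γ)
    (acc : List γ) :
    gs.foldl (fun m g => cs.foldl (fun m c => m ++ [row g c]) m) acc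
      = acc ++ gs.flatMap (fun g => cs.map (row g)) := by
  have h : (fun (m : List γ) (g : α) => cs.foldl (fun m c => m ++ [row g c]) m)
      = fun m g => m ++ cs.map (row g) := by
    funext m g; exact pv_foldl_append ..
  rw [h, PySem.List.foldl_append_eq_flatMap]

-- ===== VERDICT (by name: the statement is the Claim_ definition above) =====
theorem build_goal_competency_mappings_spec : Claim_equal_build_goal_competency_mappings := by
  intro ts date gids cids _
  unfold Spec_build_goal_competency_mappings build_goal_competency_mappings build_goal_competency_mappings_alt
  by_cases hg : gids = [] <;> by_cases hc : cids = []
  · simp [hg, hc]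
  · -- gids = [], cids ≠ [] : A maps over cids with goalid ""
    have hcb : cids.isEmpty = false := by simpa using hc
    subst hg
    simp only [hcb, List.isEmpty_nil, Bool.not_false, Bool.not_true, Bool.true_and,
      Bool.false_eq_true, if_false, List.foldl_nil, if_true]
    rw [pv_foldl_append, pv_foldl_append,
        pv_range_mul [""] cids hc (fun g c =>
          [("entrytimestamp", ts), ("entrydate", date), ("goalid", g),
           ("competencyid", c), ("notes", "")]) "" ""]
    simp [List.flatMap_def]
  · -- gids ≠ [], cids = [] : A maps over gids with competencyid ""
    have hgb : gids.isEmpty = false := by simpa using hg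
    subst hc
    simp only [hgb, List.isEmpty_nil, Bool.not_false, Bool.not_true, Bool.and_true,
      Bool.false_eq_true, if_false, if_true]
    rw [pv_foldl_append, pv_foldl_append,
        pv_range_mul gids [""] (by simp) (fun g c =>
          [("entrytimestamp", ts), ("entrydate", date), ("goalid", g),
           ("competencyid", c), ("notes", "")]) "" ""]
    simp only [List.map_cons, List.map_nil]
    rw [pv_flatMap_singleton gids (fun g =>
      [("entrytimestamp", ts), ("entrydate", date), ("goalid", g),
       ("competencyid", ""), ("notes", "")])]
  · -- both nonempty : nested loops vs flat index loop, same cross product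
    have hgb : gids.isEmpty = false := by simpa using hg
    have hcb : cids.isEmpty = false := by simpa using hc
    simp only [hgb, hcb, Bool.not_false, Bool.and_self, Bool.false_eq_true, if_false, if_true]
    rw [pv_nested_foldl gids cids (fun g c =>
          [("entrytimestamp", ts), ("entrydate", date), ("goalid", g),
           ("competencyid", c), ("notes", "")]),
        pv_foldl_append,
        pv_range_mul gids cids hc (fun g c =>
          [("entrytimestamp", ts), ("entrydate", date), ("goalid", g),
           ("competencyid", c), ("notes", "")]) "" ""]
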